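-- pv_equiv track=rewrite | github.com/cdoresca/IMN236 | Util.py | Sort_By_Columns
-- ===== SOURCE A (Python) =====
-- from collections import defaultdict
--
-- def Sort_By_Columns(points, tolerence = 15):
--     columns = defaultdict(list)
--     for x, y in points:
--         group_x = round(x / tolerence) * tolerence
--         columns[group_x].append((x, y))
--
--     for group_x in columns:
--         columns[group_x].sort(key=lambda p: p[1])
--
--     sorted_by_columns = []
--     for group_x in sorted(columns.keys()):
--         sorted_by_columns.extend(columns[group_x])
--     return sorted_by_columns
-- ===== SOURCE B (Python) =====
-- def Sort_By_Columns(points, tolerence=15):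
--     return sorted(((x, y) for x, y in points),
--                   key=lambda p: (round(p[0] / tolerence) * tolerence, p[1]))
-- ===== Notes on version B (the rewrite author's own statement) =====
-- stated objective: simpler
-- what changed: Replaces the defaultdict bucket pipeline (group by rounded x, sort each bucket by y, concatenate buckets over sorted keys) with a single stable sort under the composite key (round(x/tolerence)*tolerence, y).
-- outside the precondition, e.g. on Sort_By_Columns([(1, 2)], 0): A raises ZeroDivisionError, B raises ZeroDivisionError
import Mathlib
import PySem

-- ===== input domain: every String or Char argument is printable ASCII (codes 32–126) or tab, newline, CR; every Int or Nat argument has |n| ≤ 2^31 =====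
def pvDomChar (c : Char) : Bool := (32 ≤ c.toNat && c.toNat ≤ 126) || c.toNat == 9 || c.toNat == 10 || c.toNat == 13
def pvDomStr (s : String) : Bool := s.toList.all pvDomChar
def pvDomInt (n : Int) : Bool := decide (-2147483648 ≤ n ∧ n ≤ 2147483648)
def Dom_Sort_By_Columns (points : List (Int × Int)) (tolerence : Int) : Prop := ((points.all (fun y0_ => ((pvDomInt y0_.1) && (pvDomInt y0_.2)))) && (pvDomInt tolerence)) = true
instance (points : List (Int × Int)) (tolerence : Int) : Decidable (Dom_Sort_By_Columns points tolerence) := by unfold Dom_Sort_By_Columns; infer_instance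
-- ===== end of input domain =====

-- B replaces A's bucket-dictionary pipeline (group by rounded x, sort each bucket, concatenate over sorted keys)
-- by ONE stable sort under the composite key (rounded-x column, y): simpler, one pass over one sort.

-- round(x / t) for Python ints: half-to-even rounding of the exact rational x/t.
-- Exact w.r.t. CPython's float round(x/t) on the stated domain |x|,|t| ≤ 2^31 (a nonzero
-- integer 2*x - (2k+1)*t cannot be small enough for the float quotient to cross a half-integer).
def pyRoundDiv (x t : Int) : Int :=
  let q := PySem.Int.floordiv x t
  let r := x - q * t
  if 2 * r.natAbs < t.natAbs then q
  else if t.natAbs < 2 * r.natAbs then q + 1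
  else if q % 2 == 0 then q else q + 1

-- ===== PORT A =====
def Sort_By_Columns (points : List (Int × Int)) (tolerence : Int) : List (Int × Int) :=
  -- columns = defaultdict(list); for x, y in points: columns[round(x/tolerence)*tolerence].append((x,y))
  let columns : PySem.Dict Int (List (Int × Int)) :=
    points.foldl (fun d p => d.modify (pyRoundDiv p.1 tolerence * tolerence) [] (fun l => l ++ [p]))
      PySem.Dict.empty
  -- for group_x in columns: columns[group_x].sort(key=lambda p: p[1])
  let columns2 :=
    columns.keys.foldl (fun d k => d.modify k [] (fun l => PySem.List.sorted l (fun p => p.2) false)) columns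
  -- for group_x in sorted(columns.keys()): sorted_by_columns.extend(columns[group_x])
  (PySem.List.sorted columns2.keys (fun k => k) false).foldl (fun acc k => acc ++ columns2.getD k []) []

-- ===== PORT B =====
def Sort_By_Columns_alt (points : List (Int × Int)) (tolerence : Int) : List (Int × Int) :=
  -- sorted(((x, y) for x, y in points), key=lambda p: (round(p[0]/tolerence)*tolerence, p[1]))
  PySem.List.sorted2 (points.map (fun p => (p.1, p.2)))
    (fun p => pyRoundDiv p.1 tolerence * tolerence) (fun p => p.2) false

-- ===== PRECONDITION & SPEC =====
-- tolerence = 0 makes A (and B) raise ZeroDivisionError in round(x/tolerence); nothing else raises.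
def Pre_Sort_By_Columns (points : List (Int × Int)) (tolerence : Int) : Prop := tolerence ≠ 0
instance (points : List (Int × Int)) (tolerence : Int) : Decidable (Pre_Sort_By_Columns points tolerence) := by unfold Pre_Sort_By_Columns; infer_instance
def pvWitness_Sort_By_Columns : (List (Int × Int)) × Int := ([(1, 2), (16, 1), (2, 5)], 15)

def Spec_Sort_By_Columns (points : List (Int × Int)) (tolerence : Int) (out : List (Int × Int)) : Prop := out = Sort_By_Columns_alt points tolerence
instance (points : List (Int × Int)) (tolerence : Int) (out : List (Int × Int)) : Decidable (Spec_Sort_By_Columns points tolerence out) := by unfold Spec_Sort_By_Columns; infer_instance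

-- ===== CLAIM (what is proved, stated in full; the proofs are below) =====
def Claim_equal_Sort_By_Columns : Prop := ∀ (points : List (Int × Int)) (tolerence : Int), Dom_Sort_By_Columns points tolerence → Pre_Sort_By_Columns points tolerence → Spec_Sort_By_Columns points tolerence (Sort_By_Columns points tolerence)

-- ===== LEMMAS AND PROOFS =====

-- the column key of a point
def pvG (t : Int) (p : Int × Int) : Int := pyRoundDiv p.1 t * t
-- the lexicographic 'before' predicate of B's stable sort
def pvBlt (t : Int) (a b : Int × Int) : Bool :=
  decide (pvG t a < pvG t b) || (!decide (pvG t b < pvG t a) && decide (a.2 < b.2))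
-- the y-only 'before' predicate of A's per-bucket sort
def pvB2 (a b : Int × Int) : Bool := decide (a.2 < b.2)
-- one sorted bucket
def pvBlock (t : Int) (ps : List (Int × Int)) (c : Int) : List (Int × Int) :=
  PySem.List.sorted (ps.filter (fun p => pvG t p == c)) (fun p => p.2) false
-- canonical form: concatenation of the sorted buckets over the sorted distinct keys
def pvS (t : Int) (ps : List (Int × Int)) : List (Int × Int) :=
  (PySem.List.sorted (PySem.List.dedup (ps.map (pvG t))) (fun k => k) false).flatMap (pvBlock t ps)

-- ---- generic insertBy lemmas ----
theorem pv_insertBy_nil {α : Type} (bf : α → α → Bool) (x : α) : PySem.List.insertBy bf x [] = [x] := rfl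

theorem pv_insertBy_cons {α : Type} (bf : α → α → Bool) (x y : α) (l : List α) :
    PySem.List.insertBy bf x (y :: l) = if bf x y then x :: y :: l else y :: PySem.List.insertBy bf x l := rfl

theorem pv_insertBy_front {α : Type} (bf : α → α → Bool) (x : α) (L rest : List α)
    (h : ∀ y ∈ L, bf x y = false) :
    PySem.List.insertBy bf x (L ++ rest) = L ++ PySem.List.insertBy bf x rest := by
  induction L with
  | nil => simp
  | cons y L ih =>
    simp only [List.cons_append, pv_insertBy_cons, h y (by simp)]
    simp only [Bool.false_eq_true, if_false]
    rw [ih (fun z hz => h z (by simp [hz]))]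

theorem pv_insertBy_mid {α : Type} (bf bf' : α → α → Bool) (x : α) (M R : List α)
    (hM : ∀ y ∈ M, bf x y = bf' x y) (hR : ∀ y ∈ R, bf x y = true) :
    PySem.List.insertBy bf x (M ++ R) = PySem.List.insertBy bf' x M ++ R := by
  induction M with
  | nil =>
    cases R with
    | nil => rfl
    | cons z R => simp [pv_insertBy_cons, hR z (by simp), pv_insertBy_nil]
  | cons y M ih =>
    have hy := hM y (by simp)
    simp only [List.cons_append, pv_insertBy_cons, hy]
    by_cases hb : bf' x y = true
    · simp [hb]
    · simp only [Bool.not_eq_true] at hb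
      simp [hb, ih (fun z hz => hM z (by simp [hz]))]

theorem pv_flatMap_congr {α β : Type} (l : List α) (f g : α → List β)
    (h : ∀ x ∈ l, f x = g x) : l.flatMap f = l.flatMap g := by
  induction l with
  | nil => rfl
  | cons x l ih =>
    simp only [List.flatMap_cons, h x (by simp), ih (fun z hz => h z (by simp [hz]))]

-- an increasing Int list is its (< c)-part followed by its (≥ c)-part
theorem pv_filter_lt_decomp (K : List Int) (c : Int) (h : K.Pairwise (· < ·)) :
    K = K.filter (fun k => decide (k < c)) ++ K.filter (fun k => !decide (k < c)) := by
  induction K with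
  | nil => rfl
  | cons k K ih =>
    have hpw := (List.pairwise_cons.mp h)
    by_cases hk : k < c
    · simp only [List.filter_cons, hk, decide_true, Bool.not_true, if_true]
      simpa using ih hpw.2
    · have hall : ∀ y ∈ K, ¬(y < c) := fun y hy => by
        have := hpw.1 y hy; omega
      simp only [List.filter_cons, hk, decide_false, Bool.not_false, if_false]
      have h1 : K.filter (fun k => decide (k < c)) = [] :=
        List.filter_eq_nil_iff.mpr (fun a ha => by simpa using hall a ha)
      have h2 : K.filter (fun k => !decide (k < c)) = K :=
        List.filter_eq_self.mpr (fun a ha => by simpa using hall a ha)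
      simp [h1, h2]

-- ---- dedup of a snoc ----
theorem pv_dedup_snoc_mem {l : List Int} {c : Int} (h : c ∈ l) :
    PySem.List.dedup (l ++ [c]) = PySem.List.dedup l := by
  simp only [PySem.List.dedup_eq_ofList, PySem.Set.ofList_append_singleton]
  simp [PySem.Set.add, PySem.Set.contains, List.contains_iff_mem,
    (PySem.Set.mem_ofList l c).mpr h]

theorem pv_dedup_snoc_not_mem {l : List Int} {c : Int} (h : c ∉ l) :
    PySem.List.dedup (l ++ [c]) = PySem.List.dedup l ++ [c] := by
  simp only [PySem.List.dedup_eq_ofList, PySem.Set.ofList_append_singleton]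
  have : c ∉ PySem.Set.ofList l := fun hm => h ((PySem.Set.mem_ofList l c).mp hm)
  simp [PySem.Set.add, PySem.Set.contains, List.contains_iff_mem, this]

-- ---- buckets ----
theorem pv_mem_block {t : Int} {ps : List (Int × Int)} {c : Int} {y : Int × Int}
    (h : y ∈ pvBlock t ps c) : pvG t y = c := by
  have := (PySem.List.mem_sorted _ _ _ _).mp h
  have := (List.mem_filter.mp this).2
  simpa using this

theorem pv_block_snoc_ne {t : Int} {ps : List (Int × Int)} {x : Int × Int} {k : Int}
    (h : pvG t x ≠ k) : pvBlock t (ps ++ [x]) k = pvBlock t ps k := by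
  unfold pvBlock
  rw [List.filter_append]
  simp [h]

theorem pv_block_snoc_eq (t : Int) (ps : List (Int × Int)) (x : Int × Int) :
    pvBlock t (ps ++ [x]) (pvG t x) = PySem.List.insertBy pvB2 x (pvBlock t ps (pvG t x)) := by
  unfold pvBlock
  rw [List.filter_append]
  have : (List.filter (fun p => pvG t p == pvG t x) [x]) = [x] := by simp
  rw [this, PySem.List.sorted_eq_foldl_insertBy, PySem.List.sorted_eq_foldl_insertBy,
    List.foldl_append]
  rfl

-- ---- A-side: the dictionary pipeline computes pvS ----
theorem pv_columns_getD (ps : List (Int × Int)) (t c : Int) :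
    (ps.foldl (fun d p => d.modify (pyRoundDiv p.1 t * t) [] (fun l => l ++ [p]))
      PySem.Dict.empty).getD c []
      = ps.filter (fun p => pvG t p == c) := by
  have h : ps.foldl (fun d p => d.modify (pyRoundDiv p.1 t * t) [] (fun l => l ++ [p]))
        PySem.Dict.empty
      = (ps.map (fun p => (pvG t p, p))).foldl
          (fun d q => d.modify q.1 [] (fun l => l ++ [q.2])) PySem.Dict.empty := by
    rw [List.foldl_map]; rfl
  rw [h, PySem.Dict.getD_foldl_modify_append]
  rw [List.filter_map]
  simp [Function.comp_def]

theorem pv_columns_keys (ps : List (Int × Int)) (t : Int) :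
    (ps.foldl (fun d p => d.modify (pyRoundDiv p.1 t * t) [] (fun l => l ++ [p]))
      PySem.Dict.empty).keys = PySem.List.dedup (ps.map (pvG t)) := by
  have h := PySem.Dict.keys_foldl_modify_key ps (fun p => pvG t p) ([] : List (Int × Int))
    (fun _ p => (fun l => l ++ [p])) PySem.Dict.empty
  rw [show (fun (d : PySem.Dict Int (List (Int × Int))) (p : Int × Int) =>
        d.modify (pyRoundDiv p.1 t * t) [] (fun l => l ++ [p]))
      = (fun d p => d.modify (pvG t p) [] (fun l => l ++ [p])) from rfl]
  rw [h]
  simp only [PySem.List.dedup_eq_ofList, PySem.Set.ofList_eq_foldl]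
  rfl

theorem pv_sortify_getD (ks : List Int) (d : PySem.Dict Int (List (Int × Int)))
    (hnd : ks.Nodup) (c : Int) :
    (ks.foldl (fun d k => d.modify k [] (fun l => PySem.List.sorted l (fun p => p.2) false)) d).getD c []
      = if c ∈ ks then PySem.List.sorted (d.getD c []) (fun p => p.2) false else d.getD c [] := by
  induction ks generalizing d with
  | nil => simp
  | cons k ks ih =>
    have hnd' := (List.nodup_cons.mp hnd)
    simp only [List.foldl_cons]
    rw [ih _ hnd'.2, PySem.Dict.getD_modify]
    by_cases hmem : c ∈ ks
    · have hck : c ≠ k := fun he => hnd'.1 (he ▸ hmem)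
      simp [hmem, hck, List.mem_cons]
    · by_cases hck : c = k
      · subst hck
        simp [hmem]
      · simp [hmem, hck, List.mem_cons]

theorem pv_update_self (ks s : List Int) (h : ∀ k ∈ ks, k ∈ s) :
    PySem.Set.update s ks = s := by
  induction ks generalizing s with
  | nil => rfl
  | cons k ks ih =>
    have : PySem.Set.add s k = s := by
      simp [PySem.Set.add, PySem.Set.contains, List.contains_iff_mem, h k (by simp)]
    show PySem.Set.update (PySem.Set.add s k) ks = s
    rw [this]
    exact ih s (fun z hz => h z (by simp [hz]))

theorem pv_sortify_keys (ks : List Int) (d : PySem.Dict Int (List (Int × Int)))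
    (h : ∀ k ∈ ks, k ∈ d.keys) :
    (ks.foldl (fun d k => d.modify k [] (fun l => PySem.List.sorted l (fun p => p.2) false)) d).keys
      = d.keys := by
  have hk := PySem.Dict.keys_foldl_modify_key ks (fun k => k) ([] : List (Int × Int))
    (fun _ _ => (fun l => PySem.List.sorted l (fun p => p.2) false)) d
  simp only [List.map_id'] at hk
  rw [hk, pv_update_self _ _ h]

theorem pvA_eq_S (ps : List (Int × Int)) (t : Int) : Sort_By_Columns ps t = pvS t ps := by
  unfold Sort_By_Columns
  set columns := ps.foldl (fun d p => d.modify (pyRoundDiv p.1 t * t) [] (fun l => l ++ [p]))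
    PySem.Dict.empty with hcol
  set columns2 := columns.keys.foldl
    (fun d k => d.modify k [] (fun l => PySem.List.sorted l (fun p => p.2) false)) columns with hcol2
  have hkeys : columns.keys = PySem.List.dedup (ps.map (pvG t)) := pv_columns_keys ps t
  have hnd : columns.keys.Nodup := by
    rw [hkeys]; simp only [PySem.List.dedup_eq_ofList]; exact PySem.Set.nodup_ofList _
  have hkeys2 : columns2.keys = columns.keys :=
    pv_sortify_keys _ _ (fun k hk => hk)
  have hgetD : ∀ c, columns2.getD c [] = pvBlock t ps c := by
    intro c
    rw [hcol2, pv_sortify_getD _ _ hnd, pv_columns_getD]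
    by_cases hmem : c ∈ columns.keys
    · simp [hmem, pvBlock]
    · have hnotin : c ∉ ps.map (pvG t) := by
        rw [hkeys] at hmem
        intro hm
        exact hmem (by simpa [PySem.List.dedup_eq_ofList, PySem.Set.mem_ofList] using hm)
      have hfil : ps.filter (fun p => pvG t p == c) = [] := by
        refine List.filter_eq_nil_iff.mpr (fun p hp hbeq => ?_)
        exact hnotin (by
          have : pvG t p = c := by simpa using hbeq
          exact this ▸ List.mem_map_of_mem hp)
      simp [hmem, pvBlock, hfil, PySem.List.sorted]
  rw [PySem.List.foldl_append_eq_flatMap]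
  simp only [List.nil_append]
  rw [pv_flatMap_congr _ _ (pvBlock t ps) (fun c _ => hgetD c), hkeys2, hkeys]
  rfl

-- ---- B-side ----
theorem pvB_foldl (ps : List (Int × Int)) (t : Int) :
    Sort_By_Columns_alt ps t = ps.foldl (fun acc x => PySem.List.insertBy (pvBlt t) x acc) [] := by
  unfold Sort_By_Columns_alt
  rw [show (ps.map (fun p => (p.1, p.2))) = ps by simp]
  rfl

theorem pvS_snoc (t : Int) (ps : List (Int × Int)) (x : Int × Int) :
    pvS t (ps ++ [x]) = PySem.List.insertBy (pvBlt t) x (pvS t ps) := by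
  have hpw : (PySem.List.sorted (PySem.List.dedup (ps.map (pvG t))) (fun k => k) false).Pairwise (· < ·) := by
    simpa [PySem.List.dedup_eq_ofList] using
      PySem.List.sorted_ofList_pairwise_lt (ps.map (pvG t))
  set c := pvG t x with hc0
  set K := PySem.List.sorted (PySem.List.dedup (ps.map (pvG t))) (fun k => k) false with hKdef
  have hmapp : (ps ++ [x]).map (pvG t) = ps.map (pvG t) ++ [c] := by
    rw [hc0]; simp
  have hblt_lt : ∀ y : Int × Int, pvG t y < c → pvBlt t x y = false := by
    intro y hy
    simp only [pvBlt, ← hc0, Bool.or_eq_false_iff, Bool.and_eq_false_iff,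
      decide_eq_false_iff_not, not_lt, Bool.not_eq_false', decide_eq_true_eq]
    omega
  have hblt_gt : ∀ y : Int × Int, c < pvG t y → pvBlt t x y = true := by
    intro y hy
    simp only [pvBlt, ← hc0, Bool.or_eq_true, decide_eq_true_eq]
    omega
  have hblt_eq : ∀ y : Int × Int, pvG t y = c → pvBlt t x y = pvB2 x y := by
    intro y hy
    simp [pvBlt, pvB2, hy, ← hc0]
  have hfront : ∀ (P : List Int), (∀ k ∈ P, k < c) →
      ∀ y ∈ P.flatMap (pvBlock t ps), pvBlt t x y = false := by
    intro P hP y hy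
    obtain ⟨k, hk, hyk⟩ := List.mem_flatMap.mp hy
    have := hP k hk
    rw [← pv_mem_block hyk] at this
    exact hblt_lt y this
  have hback : ∀ (S : List Int), (∀ k ∈ S, c < k) →
      ∀ y ∈ S.flatMap (pvBlock t ps), pvBlt t x y = true := by
    intro S hS y hy
    obtain ⟨k, hk, hyk⟩ := List.mem_flatMap.mp hy
    have := hS k hk
    rw [← pv_mem_block hyk] at this
    exact hblt_gt y this
  by_cases hc : c ∈ ps.map (pvG t)
  · -- the column of x already exists
    have hcK : c ∈ K := by
      rw [hKdef, PySem.List.mem_sorted]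
      simpa [PySem.List.dedup_eq_ofList, PySem.Set.mem_ofList] using hc
    obtain ⟨P, S, hK⟩ := List.append_of_mem hcK
    have hPS : (P ++ c :: S).Pairwise (· < ·) := by rw [← hK]; exact hpw
    obtain ⟨pwP, pwCS, cross⟩ := List.pairwise_append.mp hPS
    have hP : ∀ k ∈ P, k < c := fun k hk => cross k hk c (by simp)
    have hS : ∀ k ∈ S, c < k := (List.pairwise_cons.mp pwCS).1
    have hL : pvS t (ps ++ [x]) =
        P.flatMap (pvBlock t ps) ++
          (PySem.List.insertBy pvB2 x (pvBlock t ps c) ++ S.flatMap (pvBlock t ps)) := by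
      unfold pvS
      rw [hmapp, pv_dedup_snoc_mem hc, ← hKdef, hK]
      rw [List.flatMap_append, List.flatMap_cons]
      rw [pv_flatMap_congr P _ (pvBlock t ps)
        (fun k hk => pv_block_snoc_ne (by have := hP k hk; omega))]
      rw [pv_flatMap_congr S _ (pvBlock t ps)
        (fun k hk => pv_block_snoc_ne (by have := hS k hk; omega))]
      rw [hc0, pv_block_snoc_eq]
    have hR : PySem.List.insertBy (pvBlt t) x (pvS t ps) =
        P.flatMap (pvBlock t ps) ++
          (PySem.List.insertBy pvB2 x (pvBlock t ps c) ++ S.flatMap (pvBlock t ps)) := by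
      unfold pvS
      rw [← hKdef, hK, List.flatMap_append, List.flatMap_cons]
      rw [pv_insertBy_front _ _ _ _ (hfront P hP)]
      congr 1
      exact pv_insertBy_mid _ pvB2 x _ _
        (fun y hy => hblt_eq y (pv_mem_block hy))
        (hback S hS)
    rw [hL, hR]
  · -- a new column
    set A' := K.filter (fun k => decide (k < c)) with hA'
    set B' := K.filter (fun k => !decide (k < c)) with hB'
    have hsplit : K = A' ++ B' := pv_filter_lt_decomp K c hpw
    have hA : ∀ k ∈ A', k < c := by
      intro k hk
      have := (List.mem_filter.mp hk).2
      simpa using this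
    have hKne : ∀ k ∈ K, k ≠ c := by
      intro k hk he
      apply hc
      rw [← he]
      have : k ∈ PySem.List.dedup (ps.map (pvG t)) := (PySem.List.mem_sorted _ _ _ _).mp (hKdef ▸ hk)
      simpa [PySem.List.dedup_eq_ofList, PySem.Set.mem_ofList] using this
    have hB : ∀ k ∈ B', c < k := by
      intro k hk
      have h1 := (List.mem_filter.mp hk).2
      have h2 := hKne k (List.mem_of_mem_filter hk)
      simp only [Bool.not_eq_true', decide_eq_false_iff_not, not_lt] at h1
      omega
    have hperm : (A' ++ c :: B').Perm (PySem.List.dedup (ps.map (pvG t)) ++ [c]) := by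
      have p1 : (A' ++ c :: B').Perm (c :: K) := by
        rw [hsplit]; exact List.perm_middle
      have p3 : K.Perm (PySem.List.dedup (ps.map (pvG t))) := by
        rw [hKdef]; exact PySem.List.sorted_perm _ _ _
      have p4 : (PySem.List.dedup (ps.map (pvG t)) ++ [c]).Perm
          (c :: PySem.List.dedup (ps.map (pvG t))) := List.perm_append_singleton c _
      exact p1.trans ((p3.cons c).trans p4.symm)
    have hpair : (A' ++ c :: B').Pairwise (fun a b => a < b) := by
      refine List.pairwise_append.mpr ⟨hpw.filter _, List.pairwise_cons.mpr ⟨hB, hpw.filter _⟩, ?_⟩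
      intro a ha b hb
      have ha' := hA a ha
      rcases List.mem_cons.mp hb with hb | hb
      · omega
      · have := hB b hb; omega
    have hK' : PySem.List.sorted (PySem.List.dedup (ps.map (pvG t)) ++ [c]) (fun k => k) false
        = A' ++ c :: B' :=
      PySem.List.sorted_eq_of_perm_of_pairwise_lt _ _ _ hperm hpair
    have hfil : ps.filter (fun p => pvG t p == c) = [] := by
      refine List.filter_eq_nil_iff.mpr (fun p hp hbeq => ?_)
      apply hc
      have : pvG t p = c := by simpa using hbeq
      exact this ▸ List.mem_map_of_mem hp
    have hBc : pvBlock t ps c = [] := by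
      simp [pvBlock, hfil, PySem.List.sorted]
    have hL : pvS t (ps ++ [x]) =
        A'.flatMap (pvBlock t ps) ++ ([x] ++ B'.flatMap (pvBlock t ps)) := by
      unfold pvS
      rw [hmapp, pv_dedup_snoc_not_mem hc, hK']
      rw [List.flatMap_append, List.flatMap_cons]
      rw [pv_flatMap_congr A' _ (pvBlock t ps)
        (fun k hk => pv_block_snoc_ne (by have := hA k hk; omega))]
      rw [pv_flatMap_congr B' _ (pvBlock t ps)
        (fun k hk => pv_block_snoc_ne (by have := hB k hk; omega))]
      rw [hc0, pv_block_snoc_eq, ← hc0, hBc, pv_insertBy_nil]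
    have hR : PySem.List.insertBy (pvBlt t) x (pvS t ps) =
        A'.flatMap (pvBlock t ps) ++ ([x] ++ B'.flatMap (pvBlock t ps)) := by
      unfold pvS
      rw [← hKdef, hsplit, List.flatMap_append]
      rw [pv_insertBy_front _ _ _ _ (hfront A' hA)]
      congr 1
      have := pv_insertBy_mid (pvBlt t) pvB2 x [] (B'.flatMap (pvBlock t ps))
        (by intro y hy; simp at hy) (hback B' hB)
      simpa [pv_insertBy_nil] using this
    rw [hL, hR]

theorem pvB_eq_S (ps : List (Int × Int)) (t : Int) : Sort_By_Columns_alt ps t = pvS t ps := by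
  rw [pvB_foldl]
  induction ps using List.reverseRecOn with
  | nil => rfl
  | append_singleton ps x ih =>
    rw [List.foldl_append, List.foldl_cons, List.foldl_nil, ih, pvS_snoc]

-- ===== VERDICT (by name: the statement is the Claim_ definition above) =====
theorem Sort_By_Columns_spec : Claim_equal_Sort_By_Columns := by
  intro points tolerence _ _
  unfold Spec_Sort_By_Columns
  rw [pvA_eq_S, pvB_eq_S]
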